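-- pv_equiv track=rewrite | github.com/soyukke/lean-unsolved | scripts/collatz_inverse_gap_ratio_4_tree.py | closed_form_preimage_count
-- ===== SOURCE A (Python) =====
-- def closed_form_preimage_count(m, N):
--     """
--     厳密な閉公式: |T^{-1}(m) ∩ [1,N]|
--     """
--     if m % 3 == 0 or m % 2 == 0:
--         return 0
--
--     bound = 3 * N + 1
--     if bound <= m:
--         return 0
--
--     # J = floor(log_2((3N+1)/m))
--     # 整数演算で正確に計算
--     J = (bound // m).bit_length() - 1
--     # 検証: 2^J ≤ (3N+1)/m < 2^{J+1}
--     while (1 << J) > bound // m: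
--         J -= 1
--     while (1 << (J + 1)) <= bound // m:
--         J += 1
--
--     m6 = m % 6
--     if m6 == 1:
--         start = 2
--     elif m6 == 5:
--         start = 1
--     else:
--         return 0  # should not reach for odd m not div by 3
--
--     if J < start:
--         return 0
--
--     return (J - start) // 2 + 1
-- ===== SOURCE B (Python) =====
-- def closed_form_preimage_count(m, N):
--     # Same guards as A, but counts valid exponents j = start, start+2, ...
--     # directly instead of computing J via bit_length and a closed formula.
--     if m % 3 == 0 or m % 2 == 0:
--         return 0
--
--     bound = 3 * N + 1
--     if bound <= m:
--         return 0
--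
--     m6 = m % 6
--     if m6 == 1:
--         start = 2
--     elif m6 == 5:
--         start = 1
--     else:
--         return 0
--
--     q = bound // m
--     count = 0
--     j = start
--     while (1 << j) <= q:
--         count += 1
--         j += 2
--     return count
-- ===== Notes on version B (the rewrite author's own statement) =====
-- stated objective: alternative
-- what changed: Replaces A's bit_length-based closed form (with its two correction loops and the (J-start)//2+1 formula) by a direct counting loop over the valid exponents j = start, start+2, ..., incrementing while (1 << j) <= bound // m.
import Mathlib
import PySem

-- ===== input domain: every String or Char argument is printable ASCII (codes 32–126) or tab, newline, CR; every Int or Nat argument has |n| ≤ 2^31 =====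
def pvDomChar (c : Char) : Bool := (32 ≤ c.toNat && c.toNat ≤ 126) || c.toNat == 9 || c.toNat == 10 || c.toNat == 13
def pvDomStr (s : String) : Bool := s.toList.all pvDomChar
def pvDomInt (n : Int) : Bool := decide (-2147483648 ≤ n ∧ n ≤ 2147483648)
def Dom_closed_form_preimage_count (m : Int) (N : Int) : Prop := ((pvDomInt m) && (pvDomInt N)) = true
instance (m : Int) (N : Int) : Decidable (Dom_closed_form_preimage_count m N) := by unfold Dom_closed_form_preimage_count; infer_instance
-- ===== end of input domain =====

-- B replaces A's bit_length closed form (with its correction loops) by a direct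
-- iteration over the valid exponents j = start, start+2, …; objective: alternative
-- (similar cost, plainer counting loop).

-- ===== PORT A =====
-- while (1 << J) > q: J -= 1   (fuel-bounded; '1 <<< J.toNat' is exact for J ≥ 0,
-- which holds whenever this loop runs on an input where Python A returns)
def cfLoopDown (q : Int) : Int → Nat → Int
  | J, 0 => J
  | J, fuel+1 => if q < (1 : Int) <<< J.toNat then cfLoopDown q (J - 1) fuel else J

-- while (1 << (J+1)) <= q: J += 1   (fuel-bounded)
def cfLoopUp (q : Int) : Int → Nat → Int
  | J, 0 => J
  | J, fuel+1 => if (1 : Int) <<< (J + 1).toNat ≤ q then cfLoopUp q (J + 1) fuel else J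

def closed_form_preimage_count (m : Int) (N : Int) : Int :=
  if PySem.Int.mod m 3 = 0 ∨ PySem.Int.mod m 2 = 0 then 0
  else
    let bound := 3 * N + 1
    if bound ≤ m then 0
    else
      let q := PySem.Int.floordiv bound m
      let J0 : Int := (PySem.Int.bitLength q : Int) - 1
      let J1 := cfLoopDown q J0 (J0.toNat + 1)
      let J := cfLoopUp q J1 (q.toNat + 1)
      let m6 := PySem.Int.mod m 6
      match (if m6 = 1 then some (2 : Int) else if m6 = 5 then some 1 else none) with
      | none => 0
      | some start => if J < start then 0 else PySem.Int.floordiv (J - start) 2 + 1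

-- ===== PORT B =====
-- count = 0; j = start; while (1 << j) <= q: count += 1; j += 2   (fuel-bounded;
-- j starts at 1 or 2 and only grows, so it is kept as a Nat)
def cfCount (q : Int) : Nat → Nat → Int
  | _, 0 => 0
  | j, fuel+1 => if (1 : Int) <<< j ≤ q then 1 + cfCount q (j + 2) fuel else 0

def closed_form_preimage_count_alt (m : Int) (N : Int) : Int :=
  if PySem.Int.mod m 3 = 0 ∨ PySem.Int.mod m 2 = 0 then 0
  else
    let bound := 3 * N + 1
    if bound ≤ m then 0
    else
      let m6 := PySem.Int.mod m 6
      match (if m6 = 1 then some (2 : Nat) else if m6 = 5 then some 1 else none) with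
      | none => 0
      | some start =>
        let q := PySem.Int.floordiv bound m
        cfCount q start (q.natAbs + 1)

-- ===== PRECONDITION & SPEC =====
-- Pre_ excludes exactly the inputs on which Python A raises (m < 0, odd, not divisible
-- by 3, with 3*N+1 > m: there '1 << J' is reached with a negative J → ValueError).
def Pre_closed_form_preimage_count (m : Int) (N : Int) : Prop :=
  0 ≤ m ∨ 3 * N + 1 ≤ m ∨ (3 ∣ m) ∨ (2 ∣ m)
instance (m : Int) (N : Int) : Decidable (Pre_closed_form_preimage_count m N) := by
  unfold Pre_closed_form_preimage_count; infer_instance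

def pvWitness_closed_form_preimage_count : Int × Int := (5, 10)

def Spec_closed_form_preimage_count (m : Int) (N : Int) (out : Int) : Prop :=
  out = closed_form_preimage_count_alt m N
instance (m : Int) (N : Int) (out : Int) : Decidable (Spec_closed_form_preimage_count m N out) := by
  unfold Spec_closed_form_preimage_count; infer_instance

-- ===== CLAIM (what is proved, stated in full; the proofs are below) =====
def Claim_equal_closed_form_preimage_count : Prop := ∀ (m : Int) (N : Int), Dom_closed_form_preimage_count m N → Pre_closed_form_preimage_count m N → Spec_closed_form_preimage_count m N (closed_form_preimage_count m N)

-- ===== LEMMAS AND PROOFS =====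


theorem cfCount_eq (q : Int) (hq : 1 ≤ q) (j fuel : Nat)
    (hf : PySem.Int.bitLength q ≤ fuel + j) :
    cfCount q j fuel =
      if j < PySem.Int.bitLength q
      then ((((PySem.Int.bitLength q - 1 - j) / 2 : Nat) : Int) + 1)
      else 0 := by
  have hqn : (q.natAbs : Int) = q := Int.natAbs_of_nonneg (by omega)
  have hhigh : q.natAbs < 2 ^ PySem.Int.bitLength q := PySem.Int.lt_two_pow_bitLength q
  have hlow : 2 ^ (PySem.Int.bitLength q - 1) ≤ q.natAbs :=
    PySem.Int.two_pow_bitLength_le q (by omega)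
  induction fuel generalizing j with
  | zero =>
    rw [cfCount, if_neg (by omega)]
  | succ fuel ih =>
    rw [cfCount]
    by_cases hc : (1 : Int) <<< j ≤ q
    · rw [if_pos hc]
      have hcn : 2 ^ j ≤ q.natAbs := by
        have h2 : (2 : Int) ^ j ≤ (q.natAbs : Int) := by
          rw [hqn]; simpa [Int.shiftLeft_eq] using hc
        exact_mod_cast h2
      have hjL : j < PySem.Int.bitLength q := by
        have hlt : (2 : Nat) ^ j < 2 ^ PySem.Int.bitLength q := lt_of_le_of_lt hcn hhigh
        exact (Nat.pow_lt_pow_iff_right (by norm_num)).mp hlt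
      rw [ih (j + 2) (by omega), if_pos hjL]
      by_cases h2 : j + 2 < PySem.Int.bitLength q
      · rw [if_pos h2]; omega
      · rw [if_neg h2]; omega
    · rw [if_neg hc]
      have hnj : ¬ j < PySem.Int.bitLength q := by
        intro hj
        apply hc
        rw [Int.shiftLeft_eq, one_mul]
        have h1 : (2 : Nat) ^ j ≤ 2 ^ (PySem.Int.bitLength q - 1) :=
          Nat.pow_le_pow_right (by norm_num) (by omega)
        calc (2 : Int) ^ j = ((2 ^ j : Nat) : Int) := by push_cast; ring
          _ ≤ (q.natAbs : Int) := by exact_mod_cast le_trans h1 hlow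
          _ = q := hqn
      rw [if_neg hnj]

theorem cfLoops_id (q : Int) (hq : 1 ≤ q) :
    cfLoopUp q (cfLoopDown q ((PySem.Int.bitLength q : Int) - 1)
        (((PySem.Int.bitLength q : Int) - 1).toNat + 1)) (q.toNat + 1)
      = (PySem.Int.bitLength q : Int) - 1 := by
  have hqn : (q.natAbs : Int) = q := Int.natAbs_of_nonneg (by omega)
  have hhigh : q.natAbs < 2 ^ PySem.Int.bitLength q := PySem.Int.lt_two_pow_bitLength q
  have hlow : 2 ^ (PySem.Int.bitLength q - 1) ≤ q.natAbs :=
    PySem.Int.two_pow_bitLength_le q (by omega)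
  have hL1 : 1 ≤ PySem.Int.bitLength q := by
    by_contra h
    have h0 : PySem.Int.bitLength q = 0 := by omega
    rw [h0, pow_zero] at hhigh
    omega
  have htn : ((PySem.Int.bitLength q : Int) - 1).toNat = PySem.Int.bitLength q - 1 := by omega
  have hdown : cfLoopDown q ((PySem.Int.bitLength q : Int) - 1)
      (((PySem.Int.bitLength q : Int) - 1).toNat + 1) = (PySem.Int.bitLength q : Int) - 1 := by
    rw [cfLoopDown, if_neg ?_]
    rw [htn, Int.shiftLeft_eq, one_mul]
    have hle : (2 : Int) ^ (PySem.Int.bitLength q - 1) ≤ q := by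
      calc (2 : Int) ^ (PySem.Int.bitLength q - 1)
          = ((2 ^ (PySem.Int.bitLength q - 1) : Nat) : Int) := by push_cast; ring
        _ ≤ (q.natAbs : Int) := by exact_mod_cast hlow
        _ = q := hqn
    omega
  rw [hdown, cfLoopUp, if_neg ?_]
  have ht2 : ((PySem.Int.bitLength q : Int) - 1 + 1).toNat = PySem.Int.bitLength q := by omega
  rw [ht2, Int.shiftLeft_eq, one_mul]
  have hlt : q < (2 : Int) ^ PySem.Int.bitLength q := by
    calc q = (q.natAbs : Int) := hqn.symm
      _ < ((2 ^ PySem.Int.bitLength q : Nat) : Int) := by exact_mod_cast hhigh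
      _ = (2 : Int) ^ PySem.Int.bitLength q := by push_cast; ring
  omega

theorem cfTail_eq (q : Int) (hq : 1 ≤ q) (start : Nat) :
    (if ((PySem.Int.bitLength q : Int) - 1) < (start : Int) then (0 : Int)
     else PySem.Int.floordiv ((PySem.Int.bitLength q : Int) - 1 - (start : Int)) 2 + 1)
    = cfCount q start (q.natAbs + 1) := by
  have hhigh : q.natAbs < 2 ^ PySem.Int.bitLength q := PySem.Int.lt_two_pow_bitLength q
  have hlow : 2 ^ (PySem.Int.bitLength q - 1) ≤ q.natAbs :=
    PySem.Int.two_pow_bitLength_le q (by omega)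
  have hLle : PySem.Int.bitLength q ≤ q.natAbs := by
    have h := Nat.lt_two_pow_self (n := PySem.Int.bitLength q - 1)
    omega
  rw [cfCount_eq q hq start (q.natAbs + 1) (by omega)]
  by_cases hs : start < PySem.Int.bitLength q
  · rw [if_neg (by omega), if_pos hs, PySem.Int.floordiv_eq_ediv_of_pos (by norm_num)]
    omega
  · rw [if_pos (by omega), if_neg hs]

theorem closed_form_preimage_count_spec : Claim_equal_closed_form_preimage_count := by
  intro m N _ hpre
  unfold Spec_closed_form_preimage_count closed_form_preimage_count closed_form_preimage_count_alt
  by_cases h1 : PySem.Int.mod m 3 = 0 ∨ PySem.Int.mod m 2 = 0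
  · rw [if_pos h1, if_pos h1]
  · rw [if_neg h1, if_neg h1]
    by_cases h2 : 3 * N + 1 ≤ m
    · rw [if_pos h2, if_pos h2]
    · rw [if_neg h2, if_neg h2]
      have h3 : ¬ (3 ∣ m) := fun hd => h1 (Or.inl ((PySem.Int.mod_eq_zero_iff_dvd m 3).mpr hd))
      have h4 : ¬ (2 ∣ m) := fun hd => h1 (Or.inr ((PySem.Int.mod_eq_zero_iff_dvd m 2).mpr hd))
      have hm : 1 ≤ m := by rcases hpre with h | h | h | h <;> omega
      have hq1 : 1 ≤ PySem.Int.floordiv (3 * N + 1) m := by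
        rw [PySem.Int.le_floordiv_iff_mul_le hm]; omega
      have hmod6 : PySem.Int.mod m 6 = 1 ∨ PySem.Int.mod m 6 = 5 := by
        rw [PySem.Int.mod_eq_emod_of_pos (by norm_num)]; omega
      rcases hmod6 with hm6 | hm6 <;>
        simp only [hm6, if_pos, cfLoops_id _ hq1, ← cfTail_eq _ hq1] <;>
        norm_num
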